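-- pv_equiv track=rewrite | github.com/mknoufi/stock-verify-system | .yoyo/snapshot/backend/tests/utils/in_memory_db.py | _match_condition
-- ===== SOURCE A (Python) =====
-- from typing import Any, Dict, Iterable, List, Optional
--
-- def _match_condition(value: Any, condition: Dict[str, Any]) -> bool:
--     """Evaluate comparison operators."""
--     for op, expected in condition.items():
--         if op == "$lt" and not (value < expected):
--             return False
--         if op == "$lte" and not (value <= expected):
--             return False
--         if op == "$gt" and not (value > expected):
--             return False
--         if op == "$gte" and not (value >= expected):
--             return False
--         if op == "$ne" and not (value != expected):
--             return False
--         if op not in {"$lt", "$lte", "$gt", "$gte", "$ne"}: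
--             raise ValueError(f"Unsupported operator: {op}")
--     return True
-- ===== SOURCE B (Python) =====
-- def _match_condition(value, condition):
--     """Reduce the condition to interval bounds + excluded values, then test once.
--
--     min over all $lt / $lte bounds and max over all $gt / $gte bounds give an
--     equivalent single interval; the conjunction of the original comparisons
--     holds iff value lies in that interval and avoids every $ne value.
--     """
--     lt = lte = gt = gte = None
--     ne = []
--     for op, expected in condition.items():
--         if op == "$lt":
--             lt = expected if lt is None else min(lt, expected)
--         elif op == "$lte":
--             lte = expected if lte is None else min(lte, expected)
--         elif op == "$gt":
--             gt = expected if gt is None else max(gt, expected)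
--         elif op == "$gte":
--             gte = expected if gte is None else max(gte, expected)
--         elif op == "$ne":
--             ne.append(expected)
--         else:
--             raise ValueError(f"Unsupported operator: {op}")
--     return ((lt is None or value < lt)
--             and (lte is None or value <= lte)
--             and (gt is None or value > gt)
--             and (gte is None or value >= gte)
--             and all(value != e for e in ne))
-- ===== Notes on version B (the rewrite author's own statement) =====
-- stated objective: alternative
-- what changed: Instead of testing each condition sequentially with short-circuit returns, B aggregates all conditions in one pass into a single interval (min of $lt/$lte bounds, max of $gt/$gte bounds) plus a list of $ne exclusions, and decides membership with one final check.
-- outside the precondition, e.g. on _match_condition(5, {'$lt': 3, '$x': 1}): A returns False, B raises ValueError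
import Mathlib
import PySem

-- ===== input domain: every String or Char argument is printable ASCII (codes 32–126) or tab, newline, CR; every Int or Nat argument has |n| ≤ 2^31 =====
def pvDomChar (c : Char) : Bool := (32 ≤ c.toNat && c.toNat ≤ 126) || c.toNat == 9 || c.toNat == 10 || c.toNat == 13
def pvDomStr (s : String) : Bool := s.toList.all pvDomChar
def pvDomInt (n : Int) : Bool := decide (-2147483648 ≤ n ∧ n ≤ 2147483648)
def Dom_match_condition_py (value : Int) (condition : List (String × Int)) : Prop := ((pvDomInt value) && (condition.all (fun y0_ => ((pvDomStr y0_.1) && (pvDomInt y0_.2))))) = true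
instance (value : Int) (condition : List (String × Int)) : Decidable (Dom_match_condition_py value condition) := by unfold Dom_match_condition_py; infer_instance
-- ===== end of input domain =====

-- B replaces A's sequential short-circuit test of each condition by a one-pass
-- aggregation into a single interval (min of $lt/$lte, max of $gt/$gte, list of
-- $ne exclusions) followed by one final membership check.

-- ===== PORT A =====
-- literal transliteration of A's for-loop over condition.items() with the if-chain;
-- where Python raises ValueError (unsupported operator) the port returns true — that
-- branch lies outside Pre_match_condition_py.
def matchAuxA (value : Int) : List (String × Int) → Bool
  | [] => true
  | (op, expected) :: rest =>
    if op = "$lt" ∧ ¬(value < expected) then false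
    else if op = "$lte" ∧ ¬(value ≤ expected) then false
    else if op = "$gt" ∧ ¬(value > expected) then false
    else if op = "$gte" ∧ ¬(value ≥ expected) then false
    else if op = "$ne" ∧ ¬(value ≠ expected) then false
    else if op ∉ ["$lt", "$lte", "$gt", "$gte", "$ne"] then true  -- raise ValueError
    else matchAuxA value rest

def match_condition_py (value : Int) (condition : List (String × Int)) : Bool :=
  matchAuxA value condition

-- ===== PORT B =====
-- B's 'expected if acc is None else min/max(acc, expected)'.
def updMin (acc : Option Int) (e : Int) : Option Int :=
  match acc with | none => some e | some x => some (min x e)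
def updMax (acc : Option Int) (e : Int) : Option Int :=
  match acc with | none => some e | some x => some (max x e)

-- literal transliteration of B's aggregation loop (state lt, lte, gt, gte, ne)
-- and its final interval check; the raise branch (outside Pre_) is ported as true.
def matchAuxB (value : Int) (lt lte gt gte : Option Int) (ne : List Int) :
    List (String × Int) → Bool
  | [] =>
      (lt.all fun b => value < b) && (lte.all fun b => value ≤ b) &&
      (gt.all fun b => value > b) && (gte.all fun b => value ≥ b) &&
      (ne.all fun e => value ≠ e)
  | (op, expected) :: rest =>
    if op = "$lt" then matchAuxB value (updMin lt expected) lte gt gte ne rest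
    else if op = "$lte" then matchAuxB value lt (updMin lte expected) gt gte ne rest
    else if op = "$gt" then matchAuxB value lt lte (updMax gt expected) gte ne rest
    else if op = "$gte" then matchAuxB value lt lte gt (updMax gte expected) ne rest
    else if op = "$ne" then matchAuxB value lt lte gt gte (ne ++ [expected]) rest
    else true  -- raise ValueError

def match_condition_py_alt (value : Int) (condition : List (String × Int)) : Bool :=
  matchAuxB value none none none none [] condition

-- ===== PRECONDITION & SPEC =====
def supportedOp (op : String) : Bool :=
  op ∈ ["$lt", "$lte", "$gt", "$gte", "$ne"]

-- Pre_ excludes every condition dict containing an unsupported operator: there A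
-- either raises ValueError, or (when a supported condition fails first) A returns
-- False by short-circuit while B, which validates the whole dict during its
-- aggregation pass, raises — an accidental-order corner nobody would specify.
def Pre_match_condition_py (value : Int) (condition : List (String × Int)) : Prop :=
  ∀ p ∈ condition, supportedOp p.1 = true

instance (value : Int) (condition : List (String × Int)) : Decidable (Pre_match_condition_py value condition) := by
  unfold Pre_match_condition_py; infer_instance

def pvWitness_match_condition_py : Int × (List (String × Int)) := (3, [("$gt", 1), ("$lte", 7)])

def Spec_match_condition_py (value : Int) (condition : List (String × Int)) (out : Bool) : Prop := out = match_condition_py_alt value condition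
instance (value : Int) (condition : List (String × Int)) (out : Bool) : Decidable (Spec_match_condition_py value condition out) := by unfold Spec_match_condition_py; infer_instance

-- ===== CLAIM (what is proved, stated in full; the proofs are below) =====
def Claim_equal_match_condition_py : Prop := ∀ (value : Int) (condition : List (String × Int)), Dom_match_condition_py value condition → Pre_match_condition_py value condition → Spec_match_condition_py value condition (match_condition_py value condition)

-- ===== LEMMAS AND PROOFS =====

-- the final check on the accumulated state
def checkState (value : Int) (lt lte gt gte : Option Int) (ne : List Int) : Bool :=
  (lt.all fun b => value < b) && (lte.all fun b => value ≤ b) &&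
  (gt.all fun b => value > b) && (gte.all fun b => value ≥ b) &&
  (ne.all fun e => value ≠ e)

theorem check_updMin_lt (value : Int) (lt : Option Int) (e : Int) :
    (Option.all (fun b => decide (value < b)) (updMin lt e)) =
      ((Option.all (fun b => decide (value < b)) lt) && decide (value < e)) := by
  cases lt <;> simp [updMin, Bool.and_comm]

theorem check_updMin_le (value : Int) (lte : Option Int) (e : Int) :
    (Option.all (fun b => decide (value ≤ b)) (updMin lte e)) =
      ((Option.all (fun b => decide (value ≤ b)) lte) && decide (value ≤ e)) := by
  cases lte <;> simp [updMin, Bool.and_comm]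

theorem check_updMax_gt (value : Int) (gt : Option Int) (e : Int) :
    (Option.all (fun b => decide (value > b)) (updMax gt e)) =
      ((Option.all (fun b => decide (value > b)) gt) && decide (value > e)) := by
  cases gt <;> simp [updMax, Bool.and_comm]

theorem check_updMax_ge (value : Int) (gte : Option Int) (e : Int) :
    (Option.all (fun b => decide (value ≥ b)) (updMax gte e)) =
      ((Option.all (fun b => decide (value ≥ b)) gte) && decide (value ≥ e)) := by
  cases gte <;> simp [updMax, Bool.and_comm]

-- invariant: on an all-supported list, B's loop computes the accumulated check
-- conjoined with A's result.
theorem aux_inv (value : Int) : ∀ (cond : List (String × Int))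
    (lt lte gt gte : Option Int) (ne : List Int),
    (∀ p ∈ cond, supportedOp p.1 = true) →
    matchAuxB value lt lte gt gte ne cond =
      (checkState value lt lte gt gte ne && matchAuxA value cond)
  | [], lt, lte, gt, gte, ne, _ => by
      simp [matchAuxB, matchAuxA, checkState]
  | (op, e) :: rest, lt, lte, gt, gte, ne, hsup => by
    have hop : supportedOp op = true := hsup (op, e) (by simp)
    have hrest : ∀ p ∈ rest, supportedOp p.1 = true := fun p hp => hsup p (by simp [hp])
    have hmem : op ∈ ["$lt", "$lte", "$gt", "$gte", "$ne"] := by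
      simpa [supportedOp] using hop
    have ih := aux_inv value rest
    simp only [List.mem_cons, List.not_mem_nil, or_false] at hmem
    rcases hmem with rfl | rfl | rfl | rfl | rfl
    · rw [show matchAuxB value lt lte gt gte ne (("$lt", e) :: rest) =
          matchAuxB value (updMin lt e) lte gt gte ne rest from by simp [matchAuxB],
        ih _ _ _ _ _ hrest]
      by_cases hc : value < e <;>
        simp [matchAuxA, checkState, check_updMin_lt, hc]
    · rw [show matchAuxB value lt lte gt gte ne (("$lte", e) :: rest) =
          matchAuxB value lt (updMin lte e) gt gte ne rest from by simp [matchAuxB],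
        ih _ _ _ _ _ hrest]
      by_cases hc : value ≤ e <;>
        simp [matchAuxA, checkState, check_updMin_le, hc]
    · rw [show matchAuxB value lt lte gt gte ne (("$gt", e) :: rest) =
          matchAuxB value lt lte (updMax gt e) gte ne rest from by simp [matchAuxB],
        ih _ _ _ _ _ hrest]
      by_cases hc : value > e <;>
        simp [matchAuxA, checkState, check_updMax_gt, hc]
    · rw [show matchAuxB value lt lte gt gte ne (("$gte", e) :: rest) =
          matchAuxB value lt lte gt (updMax gte e) ne rest from by simp [matchAuxB],
        ih _ _ _ _ _ hrest]
      by_cases hc : value ≥ e <;>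
        simp [matchAuxA, checkState, check_updMax_ge, hc]
    · rw [show matchAuxB value lt lte gt gte ne (("$ne", e) :: rest) =
          matchAuxB value lt lte gt gte (ne ++ [e]) rest from by simp [matchAuxB],
        ih _ _ _ _ _ hrest]
      by_cases hc : value = e <;>
        simp [matchAuxA, checkState, hc]

-- ===== VERDICT (by name: the statement is the Claim_ definition above) =====
theorem match_condition_py_spec : Claim_equal_match_condition_py := by
  intro value condition _ hpre
  unfold Spec_match_condition_py match_condition_py match_condition_py_alt
  rw [aux_inv value condition none none none none [] hpre]
  simp [checkState]
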